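/- GENERATED by tools/from_farm_form.py from farm/worked/prog_main/Proof.lean (a worked proof of the farm's unit `prog_main`,
   accepted by the verdict) — do not edit. -/
import Toy.Spec.Units.prog_main
import Toy.Spec.Proved.prog_main_Lemmas

/-!
  `prog_main` (0x105000, 42 instructions; c/toy/toy.c:65–80) satisfies its contract.

  A PROTECTED frame (`Toy.Frames.prog_main`: base = RA − 168, the 64-byte `buffer` at base + 32): the prologue poisons the two red
  zones around `buffer` (two inline 4-byte shadow stores), the single epilogue at 0x10504d zeroes them. The callees are entered
  with the frame list `(RA − 168, Toy.Frames.prog_main) :: frames`, in which `buffer` is a live stack object. The walk is cut at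
  every returned callee state (Toy/Spec/Proved/prog_main_Lemmas.lean, part 2); this file chains the six pieces:

      entry ─ pm_seg_entry_w ─┬─ cut1 (cap < 8, eax = 0) ───────────────────────────────────────────────┬─ pm_seg_cut1_w ─ ret
                            └─ cut2 ─ pm_seg_cut2_w ─ ret1 ─ pm_seg_ret1_w ─ ret2 ─ pm_seg_ret2_w ─ ret3 ─ pm_seg_ret3_w ─ cut1 ┘
-/

open X86 X86.User Asan ProgX.Base Toy.Spec

/-- `prog_main` satisfies its contract: the protected-frame prologue; `cap < 8` returns 0 through the epilogue; otherwise
`calls++`, `clamp_length`, `fill_buffer` into the frame's `buffer`, `weighted_sum`, `store_sum`, and the same epilogue. -/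
theorem Toy.Spec.Proved.prog_main_ok : Toy.Spec.prog_main.Statement := by
  intro Lay hLay μ hμ u₀ hcode h_cl h_fb h_ws h_ss others frames u ret he hpre
  -- the callees' contracts, for the frame list with the function's own frame (at RA − 168) in front
  have hcl := h_cl others (((u.reg .rsp).toNat - 168, Toy.Frames.prog_main) :: frames)
  have hfb := h_fb others (((u.reg .rsp).toNat - 168, Toy.Frames.prog_main) :: frames)
  have hws := h_ws others (((u.reg .rsp).toNat - 168, Toy.Frames.prog_main) :: frames)
  have hss := h_ss others (((u.reg .rsp).toNat - 168, Toy.Frames.prog_main) :: frames)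
  -- `b = (RA − 168) >> 3`, the shadow index of the frame's base
  have hb : Toy.Spec.Proved.prog_main.pm_IsBase_w (u.reg .rsp) ((u.reg .rsp - 168) >>> 3) := rfl
  -- 0x105000: the prologue and `if (cap < 8)`
  refine (Toy.Spec.Proved.prog_main.pm_seg_entry_w Lay hLay μ hμ u₀ hcode others frames u ret he hpre).trans ?_
  intro v1 hv1
  rcases hv1 with hcut1 | hcut2
  · -- cut1 at once: `cap < 8`
    exact Toy.Spec.Proved.prog_main.pm_seg_cut1_w Lay hLay μ hμ u₀ hcode others frames u ret he hpre _ hb v1 hcut1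
  · -- cut2: the body
    refine (Toy.Spec.Proved.prog_main.pm_seg_cut2_w Lay hLay μ hμ u₀ hcode others frames u ret hcl he hpre _ v1 hcut2).trans ?_
    intro v2 hv2
    refine (Toy.Spec.Proved.prog_main.pm_seg_ret1_w Lay hLay μ hμ u₀ hcode others frames u ret hfb he hpre _ v2 hv2).trans ?_
    intro v3 hv3
    refine (Toy.Spec.Proved.prog_main.pm_seg_ret2_w Lay hLay μ hμ u₀ hcode others frames u ret hws he hpre _ v3 hv3).trans ?_
    intro v4 hv4
    refine (Toy.Spec.Proved.prog_main.pm_seg_ret3_w Lay hLay μ hμ u₀ hcode others frames u ret hss he hpre _ v4 hv4).trans ?_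
    intro v5 hv5
    exact Toy.Spec.Proved.prog_main.pm_seg_cut1_w Lay hLay μ hμ u₀ hcode others frames u ret he hpre _ hb v5 hv5
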